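-- pv_equiv track=rewrite | github.com/anthonypena97/codecademy-python | 06-code-challenges/04-lists-advanced/04-double-index.py | double_index
-- ===== SOURCE A (Python) =====
-- def double_index(lst, index):
--   new_lst = []
--   i = 0
--   for e in lst:
--     if i == index:
--       new_lst.append(e * 2)
--     else:
--       new_lst.append(e)
--     i += 1
--   return new_lst
-- ===== SOURCE B (Python) =====
-- def double_index(lst, index):
--   new = list(lst)
--   if 0 <= index < len(new):
--     new[index] = new[index] * 2
--   return new
-- ===== Notes on version B (the rewrite author's own statement) =====
-- stated objective: simpler
-- what changed: Replaces the element-by-element scan with a manual counter by copying the list once and doing a single direct positional write when the index is in range.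
import Mathlib
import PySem

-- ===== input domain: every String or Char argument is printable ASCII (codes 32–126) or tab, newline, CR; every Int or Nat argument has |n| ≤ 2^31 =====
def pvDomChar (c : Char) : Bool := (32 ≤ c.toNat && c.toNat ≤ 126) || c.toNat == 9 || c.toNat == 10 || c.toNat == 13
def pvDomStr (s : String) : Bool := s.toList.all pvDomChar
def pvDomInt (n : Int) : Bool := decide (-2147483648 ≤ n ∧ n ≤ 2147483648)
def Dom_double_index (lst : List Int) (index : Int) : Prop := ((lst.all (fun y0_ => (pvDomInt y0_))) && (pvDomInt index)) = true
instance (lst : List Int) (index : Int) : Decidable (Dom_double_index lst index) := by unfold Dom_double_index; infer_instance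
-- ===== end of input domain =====

-- B copies the list once and does a single in-range positional write instead of A's counter loop (objective: simpler).

-- ===== PORT A =====
-- the Python for-loop: state (new_lst, i), append doubled element when i == index
def double_index_go (index : Int) (lst : List Int) (i : Int) (new_lst : List Int) : List Int :=
  match lst with
  | [] => new_lst
  | e :: rest =>
      double_index_go index rest (i + 1)
        (new_lst ++ [if i == index then e * 2 else e])

def double_index (lst : List Int) (index : Int) : List Int :=
  double_index_go index lst 0 []

-- ===== PORT B =====
def double_index_alt (lst : List Int) (index : Int) : List Int :=
  if 0 ≤ index ∧ index < lst.length then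
    lst.set index.toNat (lst.getD index.toNat 0 * 2)
  else lst

-- ===== PRECONDITION & SPEC =====
def Spec_double_index (lst : List Int) (index : Int) (out : List Int) : Prop := out = double_index_alt lst index
instance (lst : List Int) (index : Int) (out : List Int) : Decidable (Spec_double_index lst index out) := by unfold Spec_double_index; infer_instance

-- ===== CLAIM (what is proved, stated in full; the proofs are below) =====
def Claim_equal_double_index : Prop := ∀ (lst : List Int) (index : Int), Dom_double_index lst index → Spec_double_index lst index (double_index lst index)

-- ===== LEMMAS AND PROOFS =====

lemma double_index_go_append (index : Int) (lst : List Int) :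
    ∀ (i : Int) (acc : List Int),
      double_index_go index lst i acc = acc ++ double_index_go index lst i [] := by
  induction lst with
  | nil => intro i acc; simp [double_index_go]
  | cons e rest ih =>
      intro i acc
      simp only [double_index_go]
      rw [ih (i+1) ([] ++ [if i == index then e * 2 else e]), ih (i+1) (acc ++ [if i == index then e * 2 else e])]
      simp

lemma double_index_go_eq_alt (index : Int) (lst : List Int) :
    ∀ (i : Int), double_index_go index lst i [] = double_index_alt lst (index - i) := by
  induction lst with
  | nil => intro i; simp [double_index_go, double_index_alt]
  | cons e rest ih =>
      intro i
      simp only [double_index_go]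
      rw [double_index_go_append]
      rw [ih (i+1)]
      by_cases h : i = index
      · subst h
        simp only [beq_self_eq_true, if_pos]
        simp [double_index_alt]
      · have hne : (i == index) = false := by simp [h]
        rw [hne]
        simp only [if_neg Bool.false_ne_true]
        by_cases hr : 0 ≤ index - i ∧ index - i < (e :: rest).length
        · have hr' : 0 ≤ index - (i+1) ∧ index - (i+1) < rest.length := by
            simp at hr ⊢; omega
          have hk : (index - i).toNat = (index - (i+1)).toNat + 1 := by omega
          simp only [double_index_alt, if_pos hr, if_pos hr', hk]
          simp
        · have hr' : ¬ (0 ≤ index - (i+1) ∧ index - (i+1) < (rest.length : Int)) := by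
            simp at hr ⊢; omega
          simp only [double_index_alt, if_neg hr]
          rw [if_neg (by exact_mod_cast hr')]
          simp

-- ===== VERDICT (by name: the statement is the Claim_ definition above) =====
theorem double_index_spec : Claim_equal_double_index := by
  intro lst index _
  unfold Spec_double_index double_index
  rw [double_index_go_eq_alt]
  norm_num
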